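-- pv_equiv track=rewrite | github.com/biroc/algs | Google Foobar/line_up_the_captives.py | answer
-- ===== SOURCE A (Python) =====
-- from math import factorial
--
-- mem = {}
--
-- def combinations(n, k):
--     return factorial(n) // (factorial(k) * factorial(n - k))
--
-- def answer(x, y, n):
--     count = 0
--     for tallest in range(x-1,n-y+1):
--         left_rabbits = tallest
--         right_rabbits = n - tallest - 1
--
--         left_arrangements = arange(x-1, left_rabbits)
--         right_arrangements = arange(y-1, right_rabbits)
--
--         combs = combinations(n-1, left_rabbits)
--
--         count += left_arrangements * right_arrangements * combs
--     return str(count)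
--
-- def arange(visible, total):
--     if visible in mem:
--         res = mem[visible]
--         if total in res:
--             return res[total]
--
--     if visible > total:
--         return 0
--     elif visible == total:
--         return 1
--
--     count = 0
--     for i in range(total):
--         seen = i
--         unseen = total - seen - 1
--         combs = combinations(total-1, seen)
--         unseen_arrangements = factorial(unseen)
--         seen_arrangements = arange(visible-1,seen)
--         count += combs * unseen_arrangements * seen_arrangements
--
--     if visible not in mem:
--         mem[visible] = {}
--
--     mem[visible][total] = count
--     return count
-- ===== SOURCE B (Python) =====
-- from math import factorial
--
-- def answer(x, y, n):
--     # Count permutations of n rabbit heights with x visible from the left and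
--     # y visible from the right, via the Stirling-first-kind row recurrence
--     # c(i, j) = c(i-1, j-1) + (i-1)*c(i-1, j), and the closed form
--     # answer = C(k, x-1) * c(n-1, k) with k = x + y - 2.
--     k = x + y - 2
--     if k < 0 or k > n - 1:
--         return "0"
--     row = [1] + [0] * k          # row of c(0, j) for j = 0..k
--     for i in range(1, n):
--         row = [0] + [row[j - 1] + (i - 1) * row[j] for j in range(1, k + 1)]
--     return str(factorial(k) // (factorial(x - 1) * factorial(y - 1)) * row[k])
-- ===== Notes on version B (the rewrite author's own statement) =====
-- stated objective: alternative
-- what changed: Replaces A's top-down memoized recursion for arange (each value an O(n)-term sum of factorial-quotient binomials) plus an outer convolution sum with a single bottom-up DP row of unsigned Stirling numbers of the first kind (c(i,j)=c(i-1,j-1)+(i-1)c(i-1,j)) and the closed form C(x+y-2,x-1)*c(n-1,x+y-2).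
import Mathlib
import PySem

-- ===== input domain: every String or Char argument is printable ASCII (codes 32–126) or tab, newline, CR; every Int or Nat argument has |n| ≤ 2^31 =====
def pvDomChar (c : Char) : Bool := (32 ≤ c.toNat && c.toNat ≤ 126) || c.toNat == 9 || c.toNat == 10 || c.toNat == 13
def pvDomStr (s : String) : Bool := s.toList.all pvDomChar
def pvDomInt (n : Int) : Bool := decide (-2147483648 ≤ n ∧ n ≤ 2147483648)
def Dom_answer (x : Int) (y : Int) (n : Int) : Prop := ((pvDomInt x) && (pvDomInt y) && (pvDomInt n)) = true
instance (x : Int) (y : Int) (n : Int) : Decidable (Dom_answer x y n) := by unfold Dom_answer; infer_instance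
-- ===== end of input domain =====

-- B replaces A's memoized recursion plus outer sum with a bottom-up Stirling-first-kind DP row
-- and the closed form C(x+y-2, x-1) · c(n-1, x+y-2) (an alternative algorithm; no speed claim).
-- (A also mutates a module-level memo dict `mem`; that caching never changes the value returned,
-- and only the return value is compared here.)

-- ===== PORT A =====
-- math.factorial; Python raises ValueError for a negative argument — such calls happen only
-- outside Pre_answer, so totalising via .toNat is exact on every admitted input.
def pyFact (n : Int) : Int := (Nat.factorial n.toNat : Int)

def combinations (n : Int) (k : Int) : Int :=
  PySem.Int.floordiv (pyFact n) (pyFact k * pyFact (n - k))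

-- `arange` without the module-level memo dict (pure caching: it never changes the value returned).
def arangeA (visible : Int) (total : Int) : Int :=
  if visible > total then 0
  else if visible = total then 1
  else
    (PySem.List.pyRange 0 total 1).attach.foldl
      (fun count p =>
        count + combinations (total - 1) p.1 * pyFact (total - p.1 - 1)
              * arangeA (visible - 1) p.1) 0
termination_by total.toNat
decreasing_by
  have h := (PySem.List.mem_pyRange_one).1 p.2
  omega

def answer (x : Int) (y : Int) (n : Int) : String :=
  PySem.Int.toStr
    ((PySem.List.pyRange (x - 1) (n - y + 1) 1).foldl
      (fun count tallest =>
        count + arangeA (x - 1) tallest * arangeA (y - 1) (n - tallest - 1)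
              * combinations (n - 1) tallest) 0)

-- ===== PORT B =====
-- row = [0] + [row[j-1] + (i-1)*row[j] for j in range(1, k+1)]; every index hit is in range
-- here, so pyGetD's default 0 is never returned.
def rowStep (k : Int) (row : List Int) (i : Int) : List Int :=
  0 :: (PySem.List.pyRange 1 (k + 1) 1).map
    (fun j => PySem.List.pyGetD row (j - 1) 0 + (i - 1) * PySem.List.pyGetD row j 0)

def answer_alt (x : Int) (y : Int) (n : Int) : String :=
  let k := x + y - 2
  if k < 0 ∨ k > n - 1 then "0"
  else
    let row := (PySem.List.pyRange 1 n 1).foldl (rowStep k) (1 :: List.replicate k.toNat 0)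
    PySem.Int.toStr (PySem.Int.floordiv (pyFact k) (pyFact (x - 1) * pyFact (y - 1))
      * PySem.List.pyGetD row k 0)

-- ===== PRECONDITION & SPEC =====
-- Pre_answer excludes exactly the inputs on which A raises ValueError (math.factorial of a
-- negative number): A returns normally iff x,y,n ≥ 1 or its loop range(x-1, n-y+1) is empty.
def Pre_answer (x : Int) (y : Int) (n : Int) : Prop :=
  (1 ≤ x ∧ 1 ≤ y ∧ 1 ≤ n) ∨ n - y + 1 ≤ x - 1
instance (x : Int) (y : Int) (n : Int) : Decidable (Pre_answer x y n) := by
  unfold Pre_answer; infer_instance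
def pvWitness_answer : Int × Int × Int := (3, 2, 7)

def Spec_answer (x : Int) (y : Int) (n : Int) (out : String) : Prop := out = answer_alt x y n
instance (x : Int) (y : Int) (n : Int) (out : String) : Decidable (Spec_answer x y n out) := by
  unfold Spec_answer; infer_instance

-- ===== CLAIM (what is proved, stated in full; the proofs are below) =====
def Claim_equal_answer : Prop :=
  ∀ (x : Int) (y : Int) (n : Int), Dom_answer x y n → Pre_answer x y n →
    Spec_answer x y n (answer x y n)

-- ===== LEMMAS AND PROOFS =====

lemma pyFact_natCast (m : Nat) : pyFact (m : Int) = (m.factorial : Int) := by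
  simp [pyFact]

lemma combinations_eq_choose (a b : Nat) (h : b ≤ a) :
    combinations (a : Int) (b : Int) = (a.choose b : Int) := by
  unfold combinations
  have h1 : (a : Int) - b = ((a - b : Nat) : Int) := by push_cast [Nat.cast_sub h]; ring
  rw [h1, pyFact_natCast, pyFact_natCast, pyFact_natCast, ← Nat.cast_mul,
    PySem.Int.floordiv_natCast, Nat.choose_eq_factorial_div_factorial h]

-- a list sum over `List.range` is the corresponding `Finset.range` sum (definitional)
lemma sum_map_range_int (N : Nat) (f : Nat → Int) :
    ((List.range N).map f).sum = ∑ i ∈ Finset.range N, f i := rfl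

lemma choose_fact_succ (t i : Nat) (h : i ≤ t) :
    (t + 1).choose i * (t + 1 - i).factorial = (t + 1) * (t.choose i * (t - i).factorial) := by
  refine Nat.eq_of_mul_eq_mul_right (Nat.factorial_pos i) ?_
  have h1 := Nat.choose_mul_factorial_mul_factorial (Nat.le_succ_of_le h)
  have h2 := Nat.choose_mul_factorial_mul_factorial h
  calc (t + 1).choose i * (t + 1 - i).factorial * i.factorial
      = (t + 1).choose i * i.factorial * (t + 1 - i).factorial := by ring
    _ = (t + 1).factorial := h1
    _ = (t + 1) * t.factorial := Nat.factorial_succ t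
    _ = (t + 1) * (t.choose i * i.factorial * (t - i).factorial) := by rw [h2]
    _ = (t + 1) * (t.choose i * (t - i).factorial) * i.factorial := by ring

-- the summation computed by A's `arange` satisfies the Stirling-first-kind recurrence
lemma stirl_row (v t : Nat) :
    Nat.stirlingFirst (t + 1) (v + 1) =
      ∑ i ∈ Finset.range (t + 1),
        t.choose i * (t - i).factorial * Nat.stirlingFirst i v := by
  induction t with
  | zero => simp [Nat.stirlingFirst_succ_succ]
  | succ t ih =>
    rw [Finset.sum_range_succ]
    have hcongr : ∑ i ∈ Finset.range (t + 1),
        (t + 1).choose i * (t + 1 - i).factorial * Nat.stirlingFirst i v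
        = ∑ i ∈ Finset.range (t + 1),
          (t + 1) * (t.choose i * (t - i).factorial * Nat.stirlingFirst i v) := by
      refine Finset.sum_congr rfl fun i hi => ?_
      rw [choose_fact_succ t i (Nat.lt_succ_iff.mp (Finset.mem_range.mp hi))]
      ring
    rw [hcongr, ← Finset.mul_sum, ← ih]
    simp [Nat.stirlingFirst_succ_succ]

-- A's `arange visible total` is the unsigned Stirling number of the first kind c(total, visible)
lemma arangeA_eq (v t : Int) (ht : 0 ≤ t) :
    arangeA v t = if 0 ≤ v then (Nat.stirlingFirst t.toNat v.toNat : Int) else 0 := by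
  induction hN : t.toNat using Nat.strong_induction_on generalizing v t with
  | _ N IH =>
  subst hN
  rw [arangeA]
  by_cases h1 : v > t
  · rw [if_pos h1, if_pos (by omega : (0:Int) ≤ v),
      Nat.stirlingFirst_eq_zero_of_lt (by omega), Nat.cast_zero]
  by_cases h2 : v = t
  · rw [if_neg h1, if_pos h2, h2, if_pos ht, Nat.stirlingFirst_self, Nat.cast_one]
  rw [if_neg h1, if_neg h2,
    List.foldl_attach (l := PySem.List.pyRange 0 t 1)
      (f := fun count i => count + combinations (t - 1) i * pyFact (t - i - 1)
        * arangeA (v - 1) i) (b := 0),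
    PySem.List.foldl_add, zero_add, PySem.List.pyRange_one]
  simp only [List.map_map, Function.comp_def, zero_add, sub_zero]
  rw [sum_map_range_int]
  have hvt : v < t := by omega
  have hrec : ∀ i ∈ Finset.range t.toNat,
      arangeA (v - 1) (i : Int)
        = if 0 ≤ v - 1 then (Nat.stirlingFirst i (v - 1).toNat : Int) else 0 := by
    intro i hi
    have hi' := Finset.mem_range.mp hi
    have := IH i (by omega) (v - 1) (i : Int) (by positivity) (by simp)
    simpa using this
  by_cases hv : 0 ≤ v
  · rw [if_pos hv]
    by_cases hv0 : v = 0
    · subst hv0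
      rw [Finset.sum_eq_zero]
      · have hT : t.toNat = (t.toNat - 1) + 1 := by omega
        rw [hT]
        simp
      · intro i hi
        rw [hrec i hi]
        norm_num
    · -- 1 ≤ v < t
      obtain ⟨T', hT⟩ : ∃ T', t.toNat = T' + 1 := ⟨t.toNat - 1, by omega⟩
      obtain ⟨V', hV⟩ : ∃ V', v.toNat = V' + 1 := ⟨v.toNat - 1, by omega⟩
      have hsum : ∀ i ∈ Finset.range t.toNat,
          combinations (t - 1) (i : Int) * pyFact (t - (i : Int) - 1) * arangeA (v - 1) (i : Int)
            = ((T'.choose i * (T' - i).factorial * Nat.stirlingFirst i V' : Nat) : Int) := by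
        intro i hi
        have hi' := Finset.mem_range.mp hi
        have hiT : i ≤ T' := by omega
        have e1 : t - 1 = ((T' : Int)) := by omega
        have e2 : t - (i : Int) - 1 = (((T' - i : Nat) : Int)) := by omega
        have e3 : (v - 1).toNat = V' := by omega
        rw [hrec i hi, if_pos (by omega : (0:Int) ≤ v - 1), e1, e2,
          combinations_eq_choose T' i hiT, pyFact_natCast, e3]
        push_cast
        ring
      rw [Finset.sum_congr rfl hsum, ← Nat.cast_sum]
      have : t.toNat = T' + 1 := by omega
      rw [this, ← stirl_row, hV]
  · rw [if_neg hv, Finset.sum_eq_zero]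
    intro i hi
    rw [hrec i hi, if_neg (by omega)]
    ring

-- the Stirling-first-kind convolution: summing A's split over the left/right group sizes
-- collapses to a single binomial times a single Stirling number
lemma convS (m : Nat) : ∀ (a b : Nat),
    ∑ t ∈ Finset.range (m + 1),
        Nat.stirlingFirst t a * Nat.stirlingFirst (m - t) b * m.choose t
      = (a + b).choose a * Nat.stirlingFirst m (a + b) := by
  induction m with
  | zero =>
    intro a b
    cases a <;> cases b <;> simp [Nat.stirlingFirst]
  | succ m ih =>
    intro a b
    match a, b with
    | 0, b =>
      rw [Finset.sum_eq_single 0]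
      · simp
      · intro t _ ht
        obtain ⟨t', rfl⟩ := Nat.exists_eq_succ_of_ne_zero ht
        simp
      · intro h; simp at h
    | a + 1, 0 =>
      rw [Finset.sum_eq_single (m + 1)]
      · simp
      · intro t ht hne
        have h1 : t < m + 1 := by have := Finset.mem_range.mp ht; omega
        have h2 : m + 1 - t = (m - t) + 1 := by omega
        rw [h2]; simp
      · intro h; simp at h
    | a + 1, b + 1 =>
      -- shift the index down by one (the t = 0 term vanishes)
      rw [Finset.sum_range_succ']
      simp only [Nat.stirlingFirst_zero_succ, Nat.zero_mul, Nat.add_zero,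
        Nat.succ_sub_succ]
      -- split by Pascal's rule on choose (m+1) (t+1)
      have hsplit : ∑ t ∈ Finset.range (m + 1),
          Nat.stirlingFirst (t + 1) (a + 1) * Nat.stirlingFirst (m - t) (b + 1)
            * (m + 1).choose (t + 1)
          = (∑ t ∈ Finset.range (m + 1),
              Nat.stirlingFirst (t + 1) (a + 1) * Nat.stirlingFirst (m - t) (b + 1)
                * m.choose t)
            + ∑ t ∈ Finset.range (m + 1),
              Nat.stirlingFirst (t + 1) (a + 1) * Nat.stirlingFirst (m - t) (b + 1)
                * m.choose (t + 1) := by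
        rw [← Finset.sum_add_distrib]
        refine Finset.sum_congr rfl fun t _ => ?_
        rw [Nat.choose_succ_succ]; ring
      rw [hsplit]
      -- first sum: expand stirl (t+1) (a+1) by the recurrence
      have hS1 : ∑ t ∈ Finset.range (m + 1),
          Nat.stirlingFirst (t + 1) (a + 1) * Nat.stirlingFirst (m - t) (b + 1) * m.choose t
          = (∑ t ∈ Finset.range (m + 1),
              t * (Nat.stirlingFirst t (a + 1) * Nat.stirlingFirst (m - t) (b + 1) * m.choose t))
            + ∑ t ∈ Finset.range (m + 1),
              Nat.stirlingFirst t a * Nat.stirlingFirst (m - t) (b + 1) * m.choose t := by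
        rw [← Finset.sum_add_distrib]
        refine Finset.sum_congr rfl fun t _ => ?_
        rw [Nat.stirlingFirst_succ_succ]; ring
      -- second sum: shift back up, then expand stirl (m+1-s) (b+1) by the recurrence
      have hS2 : ∑ t ∈ Finset.range (m + 1),
          Nat.stirlingFirst (t + 1) (a + 1) * Nat.stirlingFirst (m - t) (b + 1) * m.choose (t + 1)
          = (∑ s ∈ Finset.range (m + 1),
              (m - s) * (Nat.stirlingFirst s (a + 1) * Nat.stirlingFirst (m - s) (b + 1)
                * m.choose s))
            + ∑ s ∈ Finset.range (m + 1),
              Nat.stirlingFirst s (a + 1) * Nat.stirlingFirst (m - s) b * m.choose s := by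
        have h0 : ∑ s ∈ Finset.range (m + 2),
              Nat.stirlingFirst s (a + 1) * Nat.stirlingFirst (m + 1 - s) (b + 1) * m.choose s
            = ∑ t ∈ Finset.range (m + 1),
              Nat.stirlingFirst (t + 1) (a + 1) * Nat.stirlingFirst (m - t) (b + 1)
                * m.choose (t + 1) := by
          rw [Finset.sum_range_succ']
          simp [Nat.succ_sub_succ]
        rw [← h0, Finset.sum_range_succ]
        simp only [Nat.choose_succ_self, Nat.mul_zero, Nat.add_zero]
        rw [← Finset.sum_add_distrib]
        refine Finset.sum_congr rfl fun s hs => ?_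
        have h1 : m + 1 - s = (m - s) + 1 := by
          have := Finset.mem_range.mp hs; omega
        rw [h1, Nat.stirlingFirst_succ_succ]; ring
      rw [hS1, hS2]
      -- collect the two weighted sums into m * (full sum)
      have hW : (∑ t ∈ Finset.range (m + 1),
            t * (Nat.stirlingFirst t (a + 1) * Nat.stirlingFirst (m - t) (b + 1) * m.choose t))
          + (∑ s ∈ Finset.range (m + 1),
            (m - s) * (Nat.stirlingFirst s (a + 1) * Nat.stirlingFirst (m - s) (b + 1)
              * m.choose s))
          = m * ∑ t ∈ Finset.range (m + 1),
              Nat.stirlingFirst t (a + 1) * Nat.stirlingFirst (m - t) (b + 1) * m.choose t := by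
        rw [← Finset.sum_add_distrib, Finset.mul_sum]
        refine Finset.sum_congr rfl fun t ht => ?_
        have h1 : t + (m - t) = m := by have := Finset.mem_range.mp ht; omega
        calc t * (Nat.stirlingFirst t (a + 1) * Nat.stirlingFirst (m - t) (b + 1) * m.choose t)
              + (m - t) * (Nat.stirlingFirst t (a + 1) * Nat.stirlingFirst (m - t) (b + 1)
                * m.choose t)
            = (t + (m - t)) * (Nat.stirlingFirst t (a + 1) * Nat.stirlingFirst (m - t) (b + 1)
                * m.choose t) := by ring
          _ = _ := by rw [h1]
      -- rearrange, apply the three induction-hypothesis instances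
      rw [show ∀ (p q r s : Nat), p + q + (r + s) = (p + r) + (q + s) from fun p q r s => by omega]
      rw [hW, ih (a + 1) (b + 1), ih a (b + 1), ih (a + 1) b]
      have e1 : a + 1 + (b + 1) = (a + b + 1) + 1 := by omega
      have e2 : a + (b + 1) = a + b + 1 := by omega
      have e3 : a + 1 + b = a + b + 1 := by omega
      rw [e1, e2, e3, Nat.stirlingFirst_succ_succ, Nat.choose_succ_succ]
      ring

-- B's fold builds the row of Stirling numbers c(m, 0..K)
lemma row_eq (K m : Nat) :
    (PySem.List.pyRange 1 ((m : Int) + 1) 1).foldl (rowStep (K : Int))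
        (1 :: List.replicate K 0)
      = (List.range (K + 1)).map (fun j => (Nat.stirlingFirst m j : Int)) := by
  induction m with
  | zero =>
    rw [PySem.List.pyRange_one_eq_nil (by norm_num)]
    simp only [List.foldl_nil, List.range_succ_eq_map, List.map_cons, List.map_map]
    simp [List.map_const', Function.comp_def]
  | succ m ih =>
    have hsplit : PySem.List.pyRange 1 (((m + 1 : Nat) : Int) + 1) 1
        = PySem.List.pyRange 1 ((m : Int) + 1) 1 ++ [(m : Int) + 1] := by
      have h1 : ((m + 1 : Nat) : Int) + 1 = ((m : Int) + 1) + 1 := by push_cast; ring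
      rw [h1, PySem.List.pyRange_one_succ_right (by omega)]
    rw [hsplit, List.foldl_append, ih, List.foldl_cons, List.foldl_nil]
    unfold rowStep
    rw [PySem.List.pyRange_one]
    have h2 : (((K : Int) + 1) - 1).toNat = K := by omega
    rw [h2, List.map_map]
    conv_rhs => rw [List.range_succ_eq_map, List.map_cons, List.map_map]
    congr 1
    case e_tail =>
      refine List.map_congr_left (fun i hi => ?_)
      have hiK := List.mem_range.mp hi
      simp only [Function.comp_def]
      have e1 : (1 : Int) + (i : Int) - 1 = ((i : Nat) : Int) := by ring
      have e2 : (1 : Int) + (i : Int) = (((i + 1 : Nat)) : Int) := by push_cast; ring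
      rw [e1, e2, PySem.List.pyGetD_natCast, PySem.List.pyGetD_natCast,
        PySem.List.getD_map_range _ _ _ _ (by omega),
        PySem.List.getD_map_range _ _ _ _ (by omega),
        Nat.stirlingFirst_succ_succ]
      push_cast
      ring

-- ===== VERDICT (by name: the statement is the Claim_ definition above) =====
theorem answer_spec : Claim_equal_answer := by
  unfold Claim_equal_answer Spec_answer
  intro x y n _ hPre
  by_cases hempty : n - y + 1 ≤ x - 1
  · -- A's loop is empty; B's guard k > n-1 fires
    unfold answer answer_alt
    rw [PySem.List.pyRange_one_eq_nil (by omega)]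
    simp only [List.foldl_nil]
    rw [if_pos (by omega : x + y - 2 < 0 ∨ x + y - 2 > n - 1)]
    rfl
  · obtain ⟨hx, hy, hn⟩ : 1 ≤ x ∧ 1 ≤ y ∧ 1 ≤ n := by
      rcases hPre with h | h
      · exact h
      · omega
    set A := (x - 1).toNat with hA
    set B := (y - 1).toNat with hB
    set N := n.toNat with hN
    have hxn : x + y - 2 ≤ n - 1 := by omega
    have hKAB : (x + y - 2).toNat = A + B := by omega
    have hABN : A + B ≤ N - 1 := by omega
    have hN1 : 1 ≤ N := by omega
    -- ===== B's value =====
    have hB_val : answer_alt x y n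
        = PySem.Int.toStr ((((A + B).choose A : Nat) : Int)
            * ((Nat.stirlingFirst (N - 1) (A + B) : Nat) : Int)) := by
      unfold answer_alt
      rw [if_neg (by omega)]
      have ek : x + y - 2 = ((A + B : Nat) : Int) := by omega
      have en : n = (((N - 1 : Nat) : Int)) + 1 := by omega
      have ex : x - 1 = ((A : Nat) : Int) := by omega
      have ey : y - 1 = ((B : Nat) : Int) := by omega
      rw [ek, en, ex, ey]
      show PySem.Int.toStr _ = _
      rw [Int.toNat_natCast, row_eq (A + B) (N - 1)]
      rw [pyFact_natCast, pyFact_natCast, pyFact_natCast, ← Nat.cast_mul,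
        PySem.Int.floordiv_natCast, PySem.List.pyGetD_natCast,
        PySem.List.getD_map_range _ _ _ _ (by omega)]
      congr 2
      rw [Nat.choose_eq_factorial_div_factorial (by omega : A ≤ A + B),
        Nat.add_sub_cancel_left]
    -- ===== A's value =====
    have hsplit : PySem.List.pyRange 0 n 1
        = (PySem.List.pyRange 0 (x - 1) 1 ++ PySem.List.pyRange (x - 1) (n - y + 1) 1)
            ++ PySem.List.pyRange (n - y + 1) n 1 := by
      rw [← PySem.List.pyRange_one_append 0 (x - 1) (n - y + 1) (by omega) (by omega),
        ← PySem.List.pyRange_one_append 0 (n - y + 1) n (by omega) (by omega)]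
    have hA_val : answer x y n
        = PySem.Int.toStr ((((A + B).choose A : Nat) : Int)
            * ((Nat.stirlingFirst (N - 1) (A + B) : Nat) : Int)) := by
      unfold answer
      rw [PySem.List.foldl_add, zero_add]
      set g : Int → Int := fun tallest =>
        arangeA (x - 1) tallest * arangeA (y - 1) (n - tallest - 1)
          * combinations (n - 1) tallest with hg
      -- terms below x-1 vanish (too few rabbits on the left)
      have hz1 : ((PySem.List.pyRange 0 (x - 1) 1).map g).sum = 0 := by
        apply List.sum_eq_zero
        intro z hz
        obtain ⟨t, ht, rfl⟩ := List.mem_map.mp hz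
        have hb := PySem.List.mem_pyRange_one.mp ht
        rw [hg]
        simp only []
        rw [arangeA_eq _ _ (by omega), if_pos (by omega),
          Nat.stirlingFirst_eq_zero_of_lt (by omega)]
        simp
      -- terms above n-y vanish (too few rabbits on the right)
      have hz3 : ((PySem.List.pyRange (n - y + 1) n 1).map g).sum = 0 := by
        apply List.sum_eq_zero
        intro z hz
        obtain ⟨t, ht, rfl⟩ := List.mem_map.mp hz
        have hb := PySem.List.mem_pyRange_one.mp ht
        rw [hg]
        simp only []
        rw [arangeA_eq (y - 1) (n - t - 1) (by omega), if_pos (by omega),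
          Nat.stirlingFirst_eq_zero_of_lt (by omega)]
        simp
      have hfull : ((PySem.List.pyRange 0 n 1).map g).sum
          = ((PySem.List.pyRange (x - 1) (n - y + 1) 1).map g).sum := by
        rw [hsplit, List.map_append, List.map_append, List.sum_append, List.sum_append,
          hz1, hz3]
        ring
      rw [← hfull]
      rw [PySem.List.pyRange_one, List.map_map, sum_map_range_int]
      have hterm : ∀ i ∈ Finset.range (n - 0).toNat,
          (g ∘ fun k : Nat => (0 : Int) + k) i
            = ((Nat.stirlingFirst i A * Nat.stirlingFirst (N - 1 - i) B
                * (N - 1).choose i : Nat) : Int) := by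
        intro i hi
        have hi' := Finset.mem_range.mp hi
        simp only [Function.comp_def, zero_add, hg]
        have e0 : ((i : Nat) : Int).toNat = i := by omega
        have e1 : (n - (i : Int) - 1).toNat = N - 1 - i := by omega
        have e2 : n - 1 = ((N - 1 : Nat) : Int) := by omega
        rw [arangeA_eq _ _ (by omega), if_pos (by omega),
          arangeA_eq _ _ (by omega), if_pos (by omega), e0, e1, ← hA, ← hB, e2,
          combinations_eq_choose (N - 1) i (by omega)]
        push_cast
        ring
      rw [Finset.sum_congr rfl hterm, ← Nat.cast_sum]
      have eN : (n - 0).toNat = (N - 1) + 1 := by omega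
      rw [eN, convS (N - 1) A B]
      push_cast
      ring_nf
    rw [hA_val, hB_val]
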